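-- pv_equiv track=rewrite | github.com/mo-tgeddes/advent-of-code | advent_of_code/day_two/dive.py | product_depth_position
-- ===== SOURCE A (Python) =====
-- def product_depth_position(course):
--     depth = 0
--     position = 0
--     # enumerate = index is the number in the list and item is the actual value
--     for index, item in enumerate(course):
--         if item[0] == "forward":
--             position = position + item[1]
--         elif item[0] == "down":
--             depth += item[1]
--         elif item[0] == "up":
--             depth -= item[1]
--     return depth * position
-- ===== SOURCE B (Python) =====
-- def product_depth_position(course):
--     position = sum(x[1] for x in course if x[0] == "forward")
--     down = sum(x[1] for x in course if x[0] == "down")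
--     up = sum(x[1] for x in course if x[0] == "up")
--     return (down - up) * position
-- ===== Notes on version B (the rewrite author's own statement) =====
-- stated objective: idiomatic
-- what changed: Replaces the single interleaved accumulating loop (with an unused enumerate index) by three independent filtered sums, one per command kind, combined at the end.
import Mathlib
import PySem

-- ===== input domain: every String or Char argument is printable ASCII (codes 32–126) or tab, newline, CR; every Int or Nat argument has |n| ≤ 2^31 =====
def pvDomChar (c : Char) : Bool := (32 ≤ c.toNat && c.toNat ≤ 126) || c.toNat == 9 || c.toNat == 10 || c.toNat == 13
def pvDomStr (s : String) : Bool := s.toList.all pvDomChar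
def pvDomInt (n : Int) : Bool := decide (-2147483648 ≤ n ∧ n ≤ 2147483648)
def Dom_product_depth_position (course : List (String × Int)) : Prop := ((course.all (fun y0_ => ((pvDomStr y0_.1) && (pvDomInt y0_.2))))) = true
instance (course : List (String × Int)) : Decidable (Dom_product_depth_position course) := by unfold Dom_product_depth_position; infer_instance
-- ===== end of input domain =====

-- B replaces A's single interleaved accumulating loop by three independent filtered sums (idiomatic decomposition).

-- ===== PORT A =====
-- one pass over enumerate(course), updating (depth, position)
def product_depth_position (course : List (String × Int)) : Int :=
  let st := (PySem.List.enumerate course).foldl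
    (fun (s : Int × Int) (ip : Int × (String × Int)) =>
      let item := ip.2
      if item.1 == "forward" then (s.1, s.2 + item.2)
      else if item.1 == "down" then (s.1 + item.2, s.2)
      else if item.1 == "up" then (s.1 - item.2, s.2)
      else s)
    (0, 0)
  st.1 * st.2

-- ===== PORT B =====
-- three filtered sums, combined at the end
def product_depth_position_alt (course : List (String × Int)) : Int :=
  let position := ((course.filter (fun x => x.1 == "forward")).map (fun x => x.2)).sum
  let down := ((course.filter (fun x => x.1 == "down")).map (fun x => x.2)).sum
  let up := ((course.filter (fun x => x.1 == "up")).map (fun x => x.2)).sum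
  (down - up) * position

-- ===== PRECONDITION & SPEC =====
def Spec_product_depth_position (course : List (String × Int)) (out : Int) : Prop := out = product_depth_position_alt course
instance (course : List (String × Int)) (out : Int) : Decidable (Spec_product_depth_position course out) := by unfold Spec_product_depth_position; infer_instance

-- ===== CLAIM (what is proved, stated in full; the proofs are below) =====
def Claim_equal_product_depth_position : Prop := ∀ (course : List (String × Int)), Dom_product_depth_position course → Spec_product_depth_position course (product_depth_position course)

-- ===== LEMMAS AND PROOFS =====

-- loop invariant: A's fold from (d, p) lands at (d + down - up, p + forward)
theorem pv_fold_inv (l : List (String × Int)) (n : Int) (d p : Int) :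
    (PySem.List.enumerate l n).foldl
      (fun (s : Int × Int) (ip : Int × (String × Int)) =>
        let item := ip.2
        if item.1 == "forward" then (s.1, s.2 + item.2)
        else if item.1 == "down" then (s.1 + item.2, s.2)
        else if item.1 == "up" then (s.1 - item.2, s.2)
        else s)
      (d, p)
    = (d + ((l.filter (fun x => x.1 == "down")).map (fun x => x.2)).sum
         - ((l.filter (fun x => x.1 == "up")).map (fun x => x.2)).sum,
       p + ((l.filter (fun x => x.1 == "forward")).map (fun x => x.2)).sum) := by
  induction l generalizing n d p with
  | nil => simp [PySem.List.enumerate]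
  | cons h t ih =>
    simp only [PySem.List.enumerate_cons, List.foldl_cons, List.filter_cons]
    by_cases hf : h.1 == "forward" <;> by_cases hd : h.1 == "down" <;>
      by_cases hu : h.1 == "up" <;>
      simp_all [ih] <;> ring

-- ===== VERDICT (by name: the statement is the Claim_ definition above) =====
theorem product_depth_position_spec : Claim_equal_product_depth_position := by
  intro course _
  show _ = _
  simp only [product_depth_position, product_depth_position_alt, pv_fold_inv]
  ring
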